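-- pv_equiv track=rewrite | github.com/kimhons/VoiceFlow-PRO | ai_text_processor/src/text_processor.py | _format_document
-- ===== SOURCE A (Python) =====
-- def _format_document(text: str) -> str:
--     """Format text for document"""
--     # Improve paragraph structure
--     paragraphs = text.split('\n\n')
--     formatted_paragraphs = []
--
--     for paragraph in paragraphs:
--         paragraph = paragraph.strip()
--         if paragraph:
--             # Ensure proper sentence structure
--             sentences = paragraph.split('. ')
--             if sentences:
--                 last_sentence = sentences[-1]
--                 if not last_sentence.endswith(('.', '!', '?')):
--                     last_sentence += '.'
--                 sentences[-1] = last_sentence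
--                 paragraph = '. '.join(sentences)
--
--             formatted_paragraphs.append(paragraph)
--
--     return '\n\n'.join(formatted_paragraphs)
-- ===== SOURCE B (Python) =====
-- def _format_document(text: str) -> str:
--     """Format text for document"""
--     return '\n\n'.join(
--         p if p.endswith(('.', '!', '?')) else p + '.'
--         for p in (q.strip() for q in text.split('\n\n'))
--         if p
--     )
-- ===== Notes on version B (the rewrite author's own statement) =====
-- stated objective: simpler
-- what changed: B drops A's split-into-sentences/modify-last/rejoin machinery entirely: it tests end punctuation on the whole stripped paragraph and appends a period directly, emitting paragraphs through a single generator expression instead of A's accumulator loop.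
import Mathlib
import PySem

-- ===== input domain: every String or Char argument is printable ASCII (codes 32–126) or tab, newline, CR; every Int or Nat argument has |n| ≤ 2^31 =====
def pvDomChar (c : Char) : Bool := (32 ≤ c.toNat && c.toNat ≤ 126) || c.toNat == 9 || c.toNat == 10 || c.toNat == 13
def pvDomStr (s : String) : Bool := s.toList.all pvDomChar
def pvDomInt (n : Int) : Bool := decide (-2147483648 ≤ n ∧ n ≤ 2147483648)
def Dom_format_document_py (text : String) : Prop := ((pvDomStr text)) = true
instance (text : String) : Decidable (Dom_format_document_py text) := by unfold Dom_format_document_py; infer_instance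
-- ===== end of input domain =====

-- B replaces A's redundant split-into-sentences/rejoin with a direct endswith test on the
-- whole stripped paragraph (objective: simpler).


-- ===== PORT A =====
-- per-paragraph body of A: split into sentences on '. ', fix the last one, rejoin
def pvFixA (p : List Char) : List Char :=
  let sentences := PySem.Chars.splitOn p ['.', ' ']
  if sentences.isEmpty then p
  else
    let lastSentence := sentences.getLast!
    let lastSentence' :=
      if PySem.Chars.endswith lastSentence ['.'] || PySem.Chars.endswith lastSentence ['!'] ||
          PySem.Chars.endswith lastSentence ['?'] then lastSentence
      else lastSentence ++ ['.']
    PySem.Chars.join ['.', ' '] (sentences.dropLast ++ [lastSentence'])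

def format_document_py (text : String) : String :=
  String.ofList (PySem.Chars.join ['\n', '\n']
    ((PySem.Chars.splitOn text.toList ['\n', '\n']).foldl (fun acc par =>
      let p := PySem.Chars.strip par
      if p.isEmpty then acc else acc ++ [pvFixA p]) []))

-- ===== PORT B =====
def format_document_py_alt (text : String) : String :=
  String.ofList (PySem.Chars.join ['\n', '\n']
    ((PySem.Chars.splitOn text.toList ['\n', '\n']).filterMap (fun par =>
      let p := PySem.Chars.strip par
      if p.isEmpty then none
      else some (if PySem.Chars.endswith p ['.'] || PySem.Chars.endswith p ['!'] ||
          PySem.Chars.endswith p ['?'] then p else p ++ ['.']))))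

-- ===== PRECONDITION & SPEC =====
def Spec_format_document_py (text : String) (out : String) : Prop := out = format_document_py_alt text
instance (text : String) (out : String) : Decidable (Spec_format_document_py text out) := by unfold Spec_format_document_py; infer_instance

-- ===== CLAIM (what is proved, stated in full; the proofs are below) =====
def Claim_equal_format_document_py : Prop := ∀ (text : String), Dom_format_document_py text → Spec_format_document_py text (format_document_py text)

-- ===== LEMMAS AND PROOFS =====

-- join of a snoc
theorem pv_join_snoc (sep : List Char) (xs : List (List Char)) (a : List Char) :
    PySem.Chars.join sep (xs ++ [a]) =
      if xs = [] then a else PySem.Chars.join sep xs ++ sep ++ a := by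
  induction xs with
  | nil => simp [PySem.Chars.join_singleton]
  | cons x t ih =>
    cases t with
    | nil => simp [PySem.Chars.join_cons_cons, PySem.Chars.join_singleton]
    | cons y u =>
      simp only [List.cons_append] at ih ⊢
      rw [PySem.Chars.join_cons_cons, ih, PySem.Chars.join_cons_cons]
      simp [List.append_assoc]

-- appending to the last fragment appends to the join
theorem pv_join_snoc_append (sep : List Char) (xs : List (List Char)) (a t : List Char) :
    PySem.Chars.join sep (xs ++ [a ++ t]) = PySem.Chars.join sep (xs ++ [a]) ++ t := by
  rw [pv_join_snoc, pv_join_snoc]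
  split <;> simp [List.append_assoc]

-- merging the last two fragments with sep in between leaves the join unchanged
theorem pv_join_snoc2 (sep : List Char) (xs : List (List Char)) (a b : List Char) :
    PySem.Chars.join sep (xs ++ [a, b]) = PySem.Chars.join sep (xs ++ [a ++ (sep ++ b)]) := by
  have h1 : xs ++ [a, b] = (xs ++ [a]) ++ [b] := by simp
  rw [h1, pv_join_snoc, if_neg (by simp), pv_join_snoc, pv_join_snoc]
  split <;> simp [List.append_assoc]

-- the invariant of splitOn's worker: joining the produced fragments restores the input
theorem pv_splitOn_go_join (sep : List Char) (hsep : sep ≠ []) (fuel : Nat) :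
    ∀ (l cur : List Char) (acc : List (List Char)), l.length < fuel →
      PySem.Chars.join sep (PySem.Chars.splitOn.go sep fuel l cur acc) =
        PySem.Chars.join sep (acc.reverse ++ [cur.reverse ++ l]) := by
  induction fuel with
  | zero => intro l cur acc h; omega
  | succ fuel ih =>
    intro l cur acc h
    cases l with
    | nil => simp [PySem.Chars.splitOn.go]
    | cons c rest =>
      rw [PySem.Chars.splitOn.go]
      split
      · rename_i hpre
        have hdrop : (List.drop sep.length (c :: rest)).length < fuel := by
          have : 1 ≤ sep.length := by cases sep <;> simp_all
          simp only [List.length_drop] at *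
          simp only [List.length_cons] at h ⊢
          omega
        rw [ih _ _ _ hdrop]
        have hl : sep ++ List.drop sep.length (c :: rest) = c :: rest := by
          exact List.prefix_iff_eq_append.mp (List.isPrefixOf_iff_prefix.mp hpre)
        calc PySem.Chars.join sep ((cur.reverse :: acc).reverse ++ [[].reverse ++ List.drop sep.length (c :: rest)])
            = PySem.Chars.join sep (acc.reverse ++ [cur.reverse, List.drop sep.length (c :: rest)]) := by
              simp [List.append_assoc]
          _ = PySem.Chars.join sep (acc.reverse ++ [cur.reverse ++ (sep ++ List.drop sep.length (c :: rest))]) := by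
              rw [pv_join_snoc2]
          _ = PySem.Chars.join sep (acc.reverse ++ [cur.reverse ++ (c :: rest)]) := by rw [hl]
      · rename_i hpre
        have hrest : rest.length < fuel := by
          simp only [List.length_cons] at h; omega
        rw [ih _ _ _ hrest]
        simp [List.append_assoc]


-- joining the fragments of splitOn restores the input (Python split/join round-trip)
theorem pv_join_splitOn (sep : List Char) (hsep : sep ≠ []) (s : List Char) :
    PySem.Chars.join sep (PySem.Chars.splitOn s sep) = s := by
  unfold PySem.Chars.splitOn
  rw [pv_splitOn_go_join sep hsep (s.length + 1) s [] [] (by omega)]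
  simp [PySem.Chars.join_singleton]

theorem pv_splitOn_ne_nil (sep : List Char) (hsep : sep ≠ []) (s : List Char) (hs : s ≠ []) :
    PySem.Chars.splitOn s sep ≠ [] := by
  intro h
  have := pv_join_splitOn sep hsep s
  rw [h] at this
  rw [PySem.Chars.join_nil] at this
  exact hs this.symm

-- a single-character suffix is exactly the last character
theorem pv_single_suffix (c : Char) (s : List Char) : [c] <:+ s ↔ s.getLast? = some c := by
  constructor
  · rintro ⟨t, rfl⟩; simp
  · intro h
    cases s.eq_nil_or_concat with
    | inl h' => simp [h'] at h
    | inr h' =>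
      obtain ⟨t, a, rfl⟩ := h'
      simp at h
      subst h
      exact ⟨t, by simp⟩

theorem pv_endswith_eq_of_getLast? (a b : List Char) (c : Char) (h : a.getLast? = b.getLast?) :
    PySem.Chars.endswith a [c] = PySem.Chars.endswith b [c] := by
  rw [Bool.eq_iff_iff, PySem.Chars.endswith_iff, PySem.Chars.endswith_iff,
    pv_single_suffix, pv_single_suffix, h]

-- the last fragment of splitOn on '. ' ends with c (≠ ' ') iff the whole string does
theorem pv_endswith_last (q : List Char) (hq : q ≠ []) (c : Char) (hc : c ≠ ' ') :
    PySem.Chars.endswith ((PySem.Chars.splitOn q ['.', ' ']).getLast!) [c] =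
      PySem.Chars.endswith q [c] := by
  have hsep : (['.', ' '] : List Char) ≠ [] := by simp
  have hne := pv_splitOn_ne_nil ['.', ' '] hsep q hq
  obtain ⟨xs, e, hfr⟩ : ∃ xs e, PySem.Chars.splitOn q ['.', ' '] = xs ++ [e] := by
    cases (PySem.Chars.splitOn q ['.', ' ']).eq_nil_or_concat with
    | inl h => exact absurd h hne
    | inr h => obtain ⟨t, a, h⟩ := h; exact ⟨t, a, by simp [h]⟩
  have hq' : PySem.Chars.join ['.', ' '] (xs ++ [e]) = q := by
    rw [← hfr]; exact pv_join_splitOn _ hsep q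
  rw [hfr]
  have hlast : (xs ++ [e]).getLast! = e := by simp
  rw [hlast]
  cases e with
  | nil =>
    have hxs : xs ≠ [] := by
      rintro rfl
      rw [pv_join_snoc] at hq'
      simp at hq'
      exact hq hq' 
    have hql : q.getLast? = some ' ' := by
      rw [← hq', pv_join_snoc, if_neg hxs]
      simp
    rw [Bool.eq_iff_iff, PySem.Chars.endswith_iff, PySem.Chars.endswith_iff,
      pv_single_suffix, pv_single_suffix, hql]
    simp
    intro h
    exact absurd h.symm hc
  | cons d e' =>
    apply pv_endswith_eq_of_getLast?
    rw [← hq', pv_join_snoc]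
    split
    · rfl
    · rw [List.append_assoc, List.getLast?_append_of_ne_nil _ (by simp),
        List.getLast?_append_of_ne_nil _ (by simp)]

-- A's per-paragraph split/fix/rejoin equals B's direct fix, on a nonempty paragraph
theorem pv_fix_eq (q : List Char) (hq : q ≠ []) :
    pvFixA q = if PySem.Chars.endswith q ['.'] || PySem.Chars.endswith q ['!'] ||
        PySem.Chars.endswith q ['?'] then q else q ++ ['.'] := by
  have hsep : (['.', ' '] : List Char) ≠ [] := by simp
  have hne := pv_splitOn_ne_nil ['.', ' '] hsep q hq
  unfold pvFixA
  rw [if_neg (by simpa [List.isEmpty_iff] using hne)]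
  simp only [pv_endswith_last q hq '.' (by decide), pv_endswith_last q hq '!' (by decide),
    pv_endswith_last q hq '?' (by decide)]
  obtain ⟨xs, e, hfr⟩ : ∃ xs e, PySem.Chars.splitOn q ['.', ' '] = xs ++ [e] := by
    cases (PySem.Chars.splitOn q ['.', ' ']).eq_nil_or_concat with
    | inl h => exact absurd h hne
    | inr h => obtain ⟨t, a, h⟩ := h; exact ⟨t, a, by simp [h]⟩
  have hq' : PySem.Chars.join ['.', ' '] (xs ++ [e]) = q := by
    rw [← hfr]; exact pv_join_splitOn _ hsep q
  have hlast : (xs ++ [e]).getLast! = e := by simp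
  rw [hfr, hlast, List.dropLast_concat]
  split
  · exact hq'
  · rw [pv_join_snoc_append, hq']

-- A's accumulator loop is B's filterMap
theorem pv_loop (l : List (List Char)) (acc : List (List Char)) :
    l.foldl (fun acc par =>
        let p := PySem.Chars.strip par
        if p.isEmpty then acc else acc ++ [pvFixA p]) acc
      = acc ++ l.filterMap (fun par =>
          let p := PySem.Chars.strip par
          if p.isEmpty then none
          else some (if PySem.Chars.endswith p ['.'] || PySem.Chars.endswith p ['!'] ||
              PySem.Chars.endswith p ['?'] then p else p ++ ['.'])) := by
  induction l generalizing acc with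
  | nil => simp
  | cons par t ih =>
    simp only [List.foldl_cons, List.filterMap_cons]
    by_cases h : (PySem.Chars.strip par).isEmpty
    · simp only [h, if_true]
      rw [ih]
    · have hne : PySem.Chars.strip par ≠ [] := by simpa [List.isEmpty_iff] using h
      simp only [h]
      rw [ih, pv_fix_eq _ hne]
      simp [List.append_assoc]

-- ===== VERDICT (by name: the statement is the Claim_ definition above) =====
theorem format_document_py_spec : Claim_equal_format_document_py := by
  intro text _
  unfold Spec_format_document_py format_document_py format_document_py_alt
  rw [pv_loop]
  simp
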